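-- pv_equiv track=rewrite | github.com/acmoral/Int-Inv-Exp-Percolation | Codes/Graph.py | GetSizeDistribution
-- ===== SOURCE A (Python) =====
-- def GetSizeDistribution(clusters):
--  #sizes = [len(cl) for cl in clusters]
--  #max_size = max(sizes)
--  hist = {}
--  for cl in clusters:
--      if len(cl) in hist:
--          hist[len(cl)] += 1
--      else:
--          hist[len(cl)] = 1
--  return hist
-- ===== SOURCE B (Python) =====
-- def GetSizeDistribution(clusters):
--     sizes = [len(cl) for cl in clusters]
--     groups = []
--     while sizes:
--         k = sizes[0]
--         groups.append((k, len([s for s in sizes if s == k])))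
--         sizes = [s for s in sizes if s != k]
--     return dict(groups)
-- ===== Notes on version B (the rewrite author's own statement) =====
-- stated objective: alternative
-- what changed: Replaces the incremental per-element dict tally by group extraction: repeatedly take the first remaining length, record its whole group's size in one partition pass, remove the group, and assemble the dict from the finished (size, count) pairs at the end.
import Mathlib
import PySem

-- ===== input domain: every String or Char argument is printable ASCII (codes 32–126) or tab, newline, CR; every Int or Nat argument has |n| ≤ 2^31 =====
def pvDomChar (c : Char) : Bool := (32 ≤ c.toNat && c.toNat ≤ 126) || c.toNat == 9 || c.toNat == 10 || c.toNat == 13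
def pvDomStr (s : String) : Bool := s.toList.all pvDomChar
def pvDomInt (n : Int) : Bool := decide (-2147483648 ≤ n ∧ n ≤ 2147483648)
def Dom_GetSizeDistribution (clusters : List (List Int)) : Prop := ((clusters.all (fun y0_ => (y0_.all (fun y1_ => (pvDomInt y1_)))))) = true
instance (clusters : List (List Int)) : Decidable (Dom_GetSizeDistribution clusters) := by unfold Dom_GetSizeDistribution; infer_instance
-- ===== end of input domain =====

-- ===== PORT A =====
-- B extracts one whole group of equal lengths per partition pass and assembles the dict at the end, instead of A's per-element dict tally; same return value proved equal.
def GetSizeDistribution (clusters : List (List Int)) : List (Int × Int) :=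
  (clusters.foldl (fun hist cl =>
      if hist.contains (cl.length : Int) then
        hist.insert (cl.length : Int) (hist.getD (cl.length : Int) 0 + 1)
      else
        hist.insert (cl.length : Int) 1)
    PySem.Dict.empty).items

-- ===== PORT B =====
-- the while loop of Source B: peel off the first value's whole group, then continue on the rest
def pvGroups (sizes : List Int) : List (Int × Int) :=
  match sizes with
  | [] => []
  | k :: t =>
      (k, (((k :: t).filter (fun s => s == k)).length : Int)) ::
        pvGroups ((k :: t).filter (fun s => s != k))
termination_by sizes.length
decreasing_by
  simp only [List.filter_cons]
  simp only [bne_self_eq_false]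
  exact Nat.lt_succ_of_le (List.length_filter_le _ _)

def GetSizeDistribution_alt (clusters : List (List Int)) : List (Int × Int) :=
  let sizes : List Int := clusters.map (fun cl => (cl.length : Int))
  let groups := pvGroups sizes
  (groups.foldl (fun d p => d.insert p.1 p.2) PySem.Dict.empty).items

-- ===== PRECONDITION & SPEC =====
def Spec_GetSizeDistribution (clusters : List (List Int)) (out : List (Int × Int)) : Prop := out = GetSizeDistribution_alt clusters
instance (clusters : List (List Int)) (out : List (Int × Int)) : Decidable (Spec_GetSizeDistribution clusters out) := by unfold Spec_GetSizeDistribution; infer_instance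

-- ===== CLAIM =====
def Claim_equal_GetSizeDistribution : Prop := ∀ (clusters : List (List Int)), Dom_GetSizeDistribution clusters → Spec_GetSizeDistribution clusters (GetSizeDistribution clusters)

-- ===== LEMMAS AND PROOFS =====

-- A's loop body is, in both branches, 'insert k (getD k 0 + 1)'
theorem GetSizeDistribution_step (hist : PySem.Dict Int Int) (cl : List Int) :
    (if hist.contains (cl.length : Int) then
        hist.insert (cl.length : Int) (hist.getD (cl.length : Int) 0 + 1)
      else
        hist.insert (cl.length : Int) 1)
    = hist.insert (cl.length : Int) (hist.getD (cl.length : Int) 0 + 1) := by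
  by_cases h : hist.contains (cl.length : Int) = true
  · simp [h]
  · simp only [Bool.not_eq_true] at h
    rw [PySem.Dict.getD_of_not_contains _ _ h]
    simp [h]


-- removing the k-group does not change the multiset of the other values
theorem count_filter_ne (t : List Int) (k j : Int) (h : j ≠ k) :
    (t.filter (fun s => s != k)).count j = t.count j := by
  induction t with
  | nil => rfl
  | cons a t ih =>
    by_cases ha : a = k
    · subst ha
      simp [ih, Ne.symm h]
    · simp [List.count_cons, ha, ih]

-- Set.discard is a filter (definitional)
theorem discard_eq_filter (s : List Int) (k : Int) :
    PySem.Set.discard s k = s.filter (fun y => y != k) := rfl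

-- set(xs) commutes with removing one value
theorem ofList_filter_ne (t : List Int) : ∀ (k : Int),
    (PySem.Set.ofList t).filter (fun s => s != k)
      = PySem.Set.ofList (t.filter (fun s => s != k)) := by
  induction t with
  | nil => intro k; rfl
  | cons a t ih =>
    intro k
    have hc : PySem.Set.ofList (a :: t)
        = a :: (PySem.Set.ofList t).filter (fun s => s != a) := by
      rw [PySem.Set.ofList_cons, discard_eq_filter]
    by_cases ha : a = k
    · subst ha
      rw [hc]
      simp only [List.filter_cons, bne_self_eq_false, List.filter_filter]
      rw [show (fun s => s != a && s != a) = (fun s => s != a) from by funext s; simp]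
      exact ih a
    · rw [hc]
      have hbne : (a != k) = true := by simp [ha]
      simp only [List.filter_cons, hbne, if_true, List.filter_filter]
      rw [show PySem.Set.ofList (a :: t.filter (fun s => s != k))
            = a :: (PySem.Set.ofList (t.filter (fun s => s != k))).filter (fun s => s != a)
          from by rw [PySem.Set.ofList_cons, discard_eq_filter]]
      rw [← ih k]
      simp only [List.filter_filter]
      rw [show (fun s => s != a && s != k) = (fun s => s != k && s != a) from by
        funext s; exact Bool.and_comm _ _]

-- first-occurrence dedup peels the head's group
theorem ofList_cons_filter (k : Int) (t : List Int) :
    PySem.Set.ofList (k :: t) = k :: PySem.Set.ofList (t.filter (fun s => s != k)) := by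
  rw [PySem.Set.ofList_cons, discard_eq_filter, ofList_filter_ne]

-- the group loop produces exactly the first-occurrence histogram
theorem pvGroups_eq (sizes : List Int) :
    pvGroups sizes = (PySem.Set.ofList sizes).map (fun k => (k, (sizes.count k : Int))) := by
  fun_induction pvGroups sizes with
  | case1 => rfl
  | case2 k t ih =>
    have h1 : ((k :: t).filter (fun s => s != k)) = t.filter (fun s => s != k) := by
      simp
    rw [h1] at ih ⊢
    rw [ih, ofList_cons_filter, List.map_cons]
    congr 1
    · rw [List.count_eq_length_filter]
    · apply List.map_congr_left
      intro j hj
      have hjmem : j ∈ t.filter (fun s => s != k) := (PySem.Set.mem_ofList _ _).mp hj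
      have hjne : j ≠ k := by
        have := List.of_mem_filter hjmem
        simpa using this
      rw [count_filter_ne t k j hjne, List.count_cons]
      simp [Ne.symm hjne]

-- keys of the finished group list are exactly set(sizes), hence distinct
theorem pvGroups_keys (sizes : List Int) :
    (pvGroups sizes).map Prod.fst = PySem.Set.ofList sizes := by
  rw [pvGroups_eq, List.map_map]
  rw [show (Prod.fst ∘ fun k : Int => (k, ((sizes.count k : Int)))) = id from by funext k; rfl]
  exact List.map_id _

-- ===== VERDICT =====
theorem GetSizeDistribution_spec : Claim_equal_GetSizeDistribution := by
  intro clusters _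
  unfold Spec_GetSizeDistribution GetSizeDistribution GetSizeDistribution_alt
  have hf : (fun (hist : PySem.Dict Int Int) (cl : List Int) =>
      if hist.contains (cl.length : Int) then
        hist.insert (cl.length : Int) (hist.getD (cl.length : Int) 0 + 1)
      else
        hist.insert (cl.length : Int) 1)
      = fun (hist : PySem.Dict Int Int) (cl : List Int) =>
          hist.insert (cl.length : Int) (hist.getD (cl.length : Int) 0 + 1) := by
    funext hist cl
    exact GetSizeDistribution_step hist cl
  rw [hf]
  rw [show (clusters.foldl (fun (hist : PySem.Dict Int Int) (cl : List Int) =>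
        hist.insert (cl.length : Int) (hist.getD (cl.length : Int) 0 + 1))
      PySem.Dict.empty)
      = (clusters.map (fun cl => (cl.length : Int))).foldl
          (fun d x => d.insert x (d.getD x 0 + 1)) PySem.Dict.empty from
    (List.foldl_map (f := fun cl : List Int => (cl.length : Int)) (g := fun (d : PySem.Dict Int Int) (x : Int) => d.insert x (d.getD x 0 + 1)) (l := clusters) (init := PySem.Dict.empty)).symm]
  rw [PySem.Dict.foldl_insert_getD_add_one_eq_counter, PySem.Dict.items_counter]
  -- B side: rebuilding the dict from the distinct-keyed group list appends them verbatim
  have hfresh := PySem.Dict.items_foldl_insert_fresh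
    (d := (PySem.Dict.empty : PySem.Dict Int Int))
    (l := pvGroups (clusters.map (fun cl => (cl.length : Int))))
    (k := Prod.fst) (v := Prod.snd)
    (by intro a _; exact PySem.Dict.contains_empty _)
    (by rw [pvGroups_keys]; exact PySem.Set.nodup_ofList _)
  rw [hfresh, pvGroups_eq]
  rw [show (PySem.Dict.empty : PySem.Dict Int Int).items = [] from rfl, List.nil_append]
  simp [Function.comp]
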